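-- pv_equiv track=rewrite | github.com/BenBrooke450/Python | Python Practice/Leetcode/223. Rectangle Area.py | computeArea
-- ===== SOURCE A (Python) =====
-- def computeArea(ax1: int, ay1: int, ax2: int, ay2: int, bx1: int, by1: int, bx2: int, by2: int) -> int:
--
--     a_x_length = list(range(ax1, ax2 + 1))
--     b_x_length = list(range(bx1, bx2 + 1))
--
--     x = 0
--
--     for a_x in a_x_length:
--         if a_x in b_x_length:
--             x = x + 1
--
--     if x>= 1:
--         x = x - 1
--
--     y = 0
--
--     a_y_length = list(range(ay1, ay2 + 1))
--     b_y_length = list(range(by1, by2 + 1))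
--
--     for a_y in a_y_length:
--         if a_y in b_y_length:
--             y = y + 1
--
--     if y>= 1:
--         y = y - 1
--
--     total_a = (len(a_x_length) - 1) * (len(a_y_length) - 1)
--     total_b = (len(b_x_length) - 1) * (len(b_y_length) - 1)
--
--     total = total_a+total_b
--
--
--     return a_x_length,b_x_length, x, y, x*y, total_a, total_b, total, total - x*y, a_y_length,b_y_length
-- ===== SOURCE B (Python) =====
-- def computeArea(ax1: int, ay1: int, ax2: int, ay2: int, bx1: int, by1: int, bx2: int, by2: int) -> int:
--     def span(lo, hi):
--         n = max(0, hi - lo + 1)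
--         return [lo + i for i in range(n)], n - 1
--     xa, wa = span(ax1, ax2)
--     xb, wb = span(bx1, bx2)
--     ya, ha = span(ay1, ay2)
--     yb, hb = span(by1, by2)
--     x = max(0, min(ax2, bx2) - max(ax1, bx1))
--     y = max(0, min(ay2, by2) - max(ay1, by1))
--     total_a = wa * ha
--     total_b = wb * hb
--     total = total_a + total_b
--     xy = x * y
--     return xa, xb, x, y, xy, total_a, total_b, total, total - xy, ya, yb
-- ===== Notes on version B (the rewrite author's own statement) =====
-- stated objective: alternative
-- what changed: replaces the nested membership scans with closed-form interval-overlap arithmetic max(0, min(hi)-max(lo)), and builds each range list and its width in one helper via a comprehension over range(n) instead of list(range(lo,hi+1)) plus len()-1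
import Mathlib
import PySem

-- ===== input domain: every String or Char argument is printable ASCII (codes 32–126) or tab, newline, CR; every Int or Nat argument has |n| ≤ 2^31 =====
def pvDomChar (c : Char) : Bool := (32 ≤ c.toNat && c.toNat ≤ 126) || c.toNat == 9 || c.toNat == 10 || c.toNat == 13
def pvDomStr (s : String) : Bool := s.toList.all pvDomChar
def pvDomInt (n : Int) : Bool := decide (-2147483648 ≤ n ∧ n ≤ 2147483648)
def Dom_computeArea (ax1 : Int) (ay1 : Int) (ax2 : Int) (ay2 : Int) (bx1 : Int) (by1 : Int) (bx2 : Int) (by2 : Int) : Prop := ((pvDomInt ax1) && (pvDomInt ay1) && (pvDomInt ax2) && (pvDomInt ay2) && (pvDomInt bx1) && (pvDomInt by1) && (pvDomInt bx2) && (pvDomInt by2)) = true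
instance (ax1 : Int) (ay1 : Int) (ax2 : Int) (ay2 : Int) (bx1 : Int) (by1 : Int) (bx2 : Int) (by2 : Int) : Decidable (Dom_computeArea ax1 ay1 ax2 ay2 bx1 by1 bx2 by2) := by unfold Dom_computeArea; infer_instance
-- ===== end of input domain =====

-- B replaces A's nested membership scans with closed-form interval-overlap arithmetic, and
-- builds each axis's range list together with its width in one helper (a comprehension over range(n)).

-- ===== PORT A =====
def computeArea (ax1 : Int) (ay1 : Int) (ax2 : Int) (ay2 : Int) (bx1 : Int) (by1 : Int) (bx2 : Int) (by2 : Int) : List Int × List Int × Int × Int × Int × Int × Int × Int × Int × List Int × List Int :=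
  let a_x_length := PySem.List.pyRange ax1 (ax2 + 1) 1
  let b_x_length := PySem.List.pyRange bx1 (bx2 + 1) 1
  let x : Int := a_x_length.foldl (fun acc a_x => if a_x ∈ b_x_length then acc + 1 else acc) 0
  let x := if x ≥ 1 then x - 1 else x
  let a_y_length := PySem.List.pyRange ay1 (ay2 + 1) 1
  let b_y_length := PySem.List.pyRange by1 (by2 + 1) 1
  let y : Int := a_y_length.foldl (fun acc a_y => if a_y ∈ b_y_length then acc + 1 else acc) 0
  let y := if y ≥ 1 then y - 1 else y
  let total_a := ((a_x_length.length : Int) - 1) * ((a_y_length.length : Int) - 1)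
  let total_b := ((b_x_length.length : Int) - 1) * ((b_y_length.length : Int) - 1)
  let total := total_a + total_b
  (a_x_length, b_x_length, x, y, x * y, total_a, total_b, total, total - x * y, a_y_length, b_y_length)

-- ===== PORT B =====
-- span(lo, hi) = ([lo + i for i in range(n)], n - 1) with n = max(0, hi - lo + 1)
def pvSpan (lo : Int) (hi : Int) : List Int × Int :=
  let n : Int := max 0 (hi - lo + 1)
  ((List.range n.toNat).map (fun (i : Nat) => lo + (i : Int)), n - 1)

def computeArea_alt (ax1 : Int) (ay1 : Int) (ax2 : Int) (ay2 : Int) (bx1 : Int) (by1 : Int) (bx2 : Int) (by2 : Int) : List Int × List Int × Int × Int × Int × Int × Int × Int × Int × List Int × List Int :=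
  let xa := pvSpan ax1 ax2
  let xb := pvSpan bx1 bx2
  let ya := pvSpan ay1 ay2
  let yb := pvSpan by1 by2
  let x : Int := max 0 (min ax2 bx2 - max ax1 bx1)
  let y : Int := max 0 (min ay2 by2 - max ay1 by1)
  let total_a := xa.2 * ya.2
  let total_b := xb.2 * yb.2
  let total := total_a + total_b
  let xy := x * y
  (xa.1, xb.1, x, y, xy, total_a, total_b, total, total - xy, ya.1, yb.1)

-- ===== PRECONDITION & SPEC =====
-- decidable equality for the output tuple, built stepwise (the nested synthesis exceeds default depth)
def pvOutDecEq : DecidableEq (List Int × List Int × Int × Int × Int × Int × Int × Int × Int × List Int × List Int) := by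
  haveI i1 : DecidableEq (List Int × List Int) := instDecidableEqProd
  haveI i2 : DecidableEq (Int × List Int × List Int) := instDecidableEqProd
  haveI i3 : DecidableEq (Int × Int × List Int × List Int) := instDecidableEqProd
  haveI i4 : DecidableEq (Int × Int × Int × List Int × List Int) := instDecidableEqProd
  haveI i5 : DecidableEq (Int × Int × Int × Int × List Int × List Int) := instDecidableEqProd
  haveI i6 : DecidableEq (Int × Int × Int × Int × Int × List Int × List Int) := instDecidableEqProd
  haveI i7 : DecidableEq (Int × Int × Int × Int × Int × Int × List Int × List Int) := instDecidableEqProd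
  haveI i8 : DecidableEq (Int × Int × Int × Int × Int × Int × Int × List Int × List Int) := instDecidableEqProd
  haveI i9 : DecidableEq (List Int × Int × Int × Int × Int × Int × Int × Int × List Int × List Int) := instDecidableEqProd
  exact instDecidableEqProd

def Spec_computeArea (ax1 : Int) (ay1 : Int) (ax2 : Int) (ay2 : Int) (bx1 : Int) (by1 : Int) (bx2 : Int) (by2 : Int) (out : List Int × List Int × Int × Int × Int × Int × Int × Int × Int × List Int × List Int) : Prop := out = computeArea_alt ax1 ay1 ax2 ay2 bx1 by1 bx2 by2
instance (ax1 : Int) (ay1 : Int) (ax2 : Int) (ay2 : Int) (bx1 : Int) (by1 : Int) (bx2 : Int) (by2 : Int) (out : List Int × List Int × Int × Int × Int × Int × Int × Int × Int × List Int × List Int) : Decidable (Spec_computeArea ax1 ay1 ax2 ay2 bx1 by1 bx2 by2 out) := by unfold Spec_computeArea; exact pvOutDecEq _ _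

-- ===== CLAIM (what is proved, stated in full; the proofs are below) =====
def Claim_equal_computeArea : Prop := ∀ (ax1 : Int) (ay1 : Int) (ax2 : Int) (ay2 : Int) (bx1 : Int) (by1 : Int) (bx2 : Int) (by2 : Int), Dom_computeArea ax1 ay1 ax2 ay2 bx1 by1 bx2 by2 → Spec_computeArea ax1 ay1 ax2 ay2 bx1 by1 bx2 by2 (computeArea ax1 ay1 ax2 ay2 bx1 by1 bx2 by2)

-- ===== LEMMAS AND PROOFS =====

-- A's counting loop with accumulator n equals n + the count of matching elements.
theorem foldl_count_mem (xs : List Int) (p : Int → Prop) [DecidablePred p] (n : Int) :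
    xs.foldl (fun acc a => if p a then acc + 1 else acc) n = n + (xs.countP (fun a => decide (p a)) : Nat) := by
  induction xs generalizing n with
  | nil => simp
  | cons h t ih =>
    simp only [List.foldl_cons, List.countP_cons, ih]
    by_cases hp : p h <;> simp [hp] <;> ring

-- Count of elements of range [a,b) lying in [a',b') is the size of the interval intersection.
theorem countP_pyRange_mem (a' b' a b : Int) :
    ((PySem.List.pyRange a b 1).countP (fun m => decide (m ∈ PySem.List.pyRange a' b' 1)) : Int)
      = (min b b' - max a a').toNat := by
  by_cases hab : b ≤ a
  · rw [PySem.List.pyRange_one_eq_nil hab]; simp; omega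
  · rw [not_le] at hab
    have hlen : ((b - (a+1)).toNat) < ((b - a).toNat) := by omega
    rw [PySem.List.pyRange_one_cons hab, List.countP_cons]
    have ih := countP_pyRange_mem a' b' (a+1) b
    by_cases hm : a ∈ PySem.List.pyRange a' b' 1
    · have := (PySem.List.mem_pyRange_one).mp hm
      simp only [hm, decide_true]
      push_cast
      rw [ih]
      omega
    · have hnot : ¬ (a' ≤ a ∧ a < b') := fun h => hm ((PySem.List.mem_pyRange_one).mpr h)
      simp only [hm, decide_false]
      push_cast
      rw [ih]
      omega
termination_by (b - a).toNat
decreasing_by omega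

-- The per-axis value A computes (count, then decrement if positive) in closed form.
theorem axis_closed_form (a1 a2 b1 b2 : Int) :
    (let c : Int := (PySem.List.pyRange a1 (a2+1) 1).foldl
        (fun acc m => if m ∈ PySem.List.pyRange b1 (b2+1) 1 then acc + 1 else acc) 0
     if c ≥ 1 then c - 1 else c) = max 0 (min a2 b2 - max a1 b1) := by
  have h := foldl_count_mem (PySem.List.pyRange a1 (a2+1) 1)
      (fun m => m ∈ PySem.List.pyRange b1 (b2+1) 1) 0
  have h2 := countP_pyRange_mem b1 (b2+1) a1 (a2+1)
  simp only [h, zero_add]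
  rw [h2]
  omega

-- B's span helper produces exactly A's list(range(lo, hi+1)).
theorem span_fst (lo hi : Int) : (pvSpan lo hi).1 = PySem.List.pyRange lo (hi+1) 1 := by
  rw [PySem.List.pyRange_one]
  have h : (max 0 (hi - lo + 1)).toNat = (hi + 1 - lo).toNat := by omega
  simp only [pvSpan, h]


-- B's span width is A's len(list(range(lo, hi+1))) - 1.
theorem span_snd (lo hi : Int) : (pvSpan lo hi).2 = ((PySem.List.pyRange lo (hi+1) 1).length : Int) - 1 := by
  simp only [pvSpan, PySem.List.length_pyRange_one]
  omega

-- ===== VERDICT (by name: the statement is the Claim_ definition above) =====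
theorem computeArea_spec : Claim_equal_computeArea := by
  intro ax1 ay1 ax2 ay2 bx1 by1 bx2 by2 _
  unfold Spec_computeArea computeArea computeArea_alt
  simp only [axis_closed_form, span_fst, span_snd]
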